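-- pv_equiv track=rewrite | github.com/barrykidney/tripleDES_python | Generate_keys.py | gen_key_blocks
-- ===== SOURCE A (Python) =====
-- import math
--
-- def remove_first_bit(numb):
--     numb -= int(math.pow(2, len(bin(numb)[2:]) - 1))
--     return numb
--
-- def gen_key_blocks(c, d, shifts):
--     for x in range(len(shifts)):
--         sft = int(shifts[x])
--         cf = c["c" + str(x)]
--         df = d["d" + str(x)]
--
--         while sft > 0:
--             cf = cf << 1
--             if len(bin(cf)[2:]) > 28:
--                 cf += 1
--                 cf = remove_first_bit(cf)
--
--             df = df << 1
--             if len(bin(df)[2:]) > 28: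
--                 df += 1
--                 df = remove_first_bit(df)
--             sft -= 1
--
--         c["c{0}".format(x + 1)] = cf
--         d["d{0}".format(x + 1)] = df
--
--     return c, d
-- ===== SOURCE B (Python) =====
-- def gen_key_blocks(c, d, shifts):
--     # closed-form 28-bit circular left rotation instead of the bit-by-bit while loop
--     for x in range(len(shifts)):
--         s = max(int(shifts[x]), 0) % 28
--         cf = c["c" + str(x)]
--         df = d["d" + str(x)]
--         c["c" + str(x + 1)] = (cf * 2 ** s) % (1 << 28) + cf // 2 ** (28 - s)
--         d["d" + str(x + 1)] = (df * 2 ** s) % (1 << 28) + df // 2 ** (28 - s)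
--     return c, d
-- ===== Notes on version B (the rewrite author's own statement) =====
-- stated objective: faster
-- what changed: The bit-by-bit while loop (shift left once, test bin-length, re-add and strip the top bit, sft times) is replaced by a closed-form 28-bit circular rotation computed arithmetically with the shift amount reduced mod 28.
import Mathlib
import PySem

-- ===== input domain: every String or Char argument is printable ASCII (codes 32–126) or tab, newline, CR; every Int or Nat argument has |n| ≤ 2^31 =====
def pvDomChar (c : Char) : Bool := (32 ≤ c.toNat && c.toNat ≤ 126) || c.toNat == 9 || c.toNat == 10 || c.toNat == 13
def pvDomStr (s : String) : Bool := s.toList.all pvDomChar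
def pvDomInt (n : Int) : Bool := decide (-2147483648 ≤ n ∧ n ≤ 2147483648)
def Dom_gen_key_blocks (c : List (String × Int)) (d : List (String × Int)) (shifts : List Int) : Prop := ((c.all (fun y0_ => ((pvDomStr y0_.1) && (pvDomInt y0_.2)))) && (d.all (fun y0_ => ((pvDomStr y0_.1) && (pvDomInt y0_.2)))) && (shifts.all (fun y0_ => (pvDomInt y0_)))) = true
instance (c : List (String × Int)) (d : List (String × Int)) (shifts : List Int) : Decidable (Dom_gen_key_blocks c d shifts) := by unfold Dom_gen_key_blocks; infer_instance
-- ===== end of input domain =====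

-- B replaces A's bit-by-bit rotation loop (sft single left-shifts with a bin-length test)
-- by a closed-form 28-bit circular left rotation with the shift reduced mod 28 (asymptotically
-- faster in the shift amount). Both A and B mutate the dicts c and d identically in Python;
-- the theorems here are about the returned value (which carries those same dicts).


-- ===== PORT A =====

-- len(bin(n)[2:]); bin(0) = "0b0", bin of a negative starts "-0b" so [2:] keeps a 'b'
def pyBinLen (n : Int) : Nat :=
  if n < 0 then 1 + PySem.Int.bitLength n else max (PySem.Int.bitLength n) 1

-- numb -= int(math.pow(2, len(bin(numb)[2:]) - 1)); math.pow is exact for the exponents reached here (< 2^53)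
def remove_first_bit (numb : Int) : Int :=
  numb - 2 ^ (pyBinLen numb - 1)

-- one iteration of the while body for one half: v = v << 1; if len(bin(v)[2:]) > 28: v += 1; v = remove_first_bit(v)
def aStep (v : Int) : Int :=
  let v := v <<< (1 : Nat)
  if 28 < pyBinLen v then remove_first_bit (v + 1) else v

-- the while loop: runs sft.toNat times (while sft > 0), cf updated first, then df
def aInner : Nat → Int → Int → Int × Int
  | 0, cf, df => (cf, df)
  | n + 1, cf, df => aInner n (aStep cf) (aStep df)

-- for x in range(len(shifts)): dict reads raise KeyError when missing (excluded by Pre_; getD 0 marks that spot)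
def aOuter : Int → List Int → PySem.Dict String Int → PySem.Dict String Int →
    PySem.Dict String Int × PySem.Dict String Int
  | _, [], c, d => (c, d)
  | x, sft :: rest, c, d =>
    let cf := c.getD ("c" ++ PySem.Int.toStr x) 0
    let df := d.getD ("d" ++ PySem.Int.toStr x) 0
    let p := aInner sft.toNat cf df
    aOuter (x + 1) rest (c.insert ("c" ++ PySem.Int.toStr (x + 1)) p.1)
                        (d.insert ("d" ++ PySem.Int.toStr (x + 1)) p.2)

def gen_key_blocks (c : List (String × Int)) (d : List (String × Int)) (shifts : List Int) : (List (String × Int)) × (List (String × Int)) :=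
  let r := aOuter 0 shifts (PySem.Dict.mk c) (PySem.Dict.mk d)
  (r.1.items, r.2.items)

-- ===== PORT B =====

-- for x in range(len(shifts)): s = max(int(shifts[x]), 0) % 28; write (v * 2**s) % (1 << 28) + v // 2**(28 - s)
def bOuter : Int → List Int → PySem.Dict String Int → PySem.Dict String Int →
    PySem.Dict String Int × PySem.Dict String Int
  | _, [], c, d => (c, d)
  | x, sh :: rest, c, d =>
    let s := (PySem.Int.mod (max sh 0) 28).toNat
    let cf := c.getD ("c" ++ PySem.Int.toStr x) 0
    let df := d.getD ("d" ++ PySem.Int.toStr x) 0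
    bOuter (x + 1) rest
      (c.insert ("c" ++ PySem.Int.toStr (x + 1))
        (PySem.Int.mod (cf * 2 ^ s) ((1 : Int) <<< (28 : Nat)) + PySem.Int.floordiv cf (2 ^ (28 - s))))
      (d.insert ("d" ++ PySem.Int.toStr (x + 1))
        (PySem.Int.mod (df * 2 ^ s) ((1 : Int) <<< (28 : Nat)) + PySem.Int.floordiv df (2 ^ (28 - s))))

def gen_key_blocks_alt (c : List (String × Int)) (d : List (String × Int)) (shifts : List Int) : (List (String × Int)) × (List (String × Int)) :=
  let r := bOuter 0 shifts (PySem.Dict.mk c) (PySem.Dict.mk d)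
  (r.1.items, r.2.items)

-- ===== PRECONDITION & SPEC =====

def inR28 (o : Option Int) : Bool := o.elim false (fun v => decide (0 ≤ v ∧ v < 2 ^ 28))

-- Pre_ narrows to the function's natural (DES) domain: when shifts is nonempty, the initial halves
-- c["c0"] and d["d0"] must exist (a missing key makes A raise KeyError) and lie in [0, 2^28) —
-- outside 28 bits A's bin-length test does not implement any fixed-width rotation and its value is
-- an artefact of the representation (see the cite in claim.json).
def Pre_gen_key_blocks (c : List (String × Int)) (d : List (String × Int)) (shifts : List Int) : Prop :=
  shifts = [] ∨
    (inR28 ((PySem.Dict.mk c).get? "c0") = true ∧ inR28 ((PySem.Dict.mk d).get? "d0") = true)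
instance (c : List (String × Int)) (d : List (String × Int)) (shifts : List Int) : Decidable (Pre_gen_key_blocks c d shifts) := by unfold Pre_gen_key_blocks; infer_instance

def pvWitness_gen_key_blocks : (List (String × Int)) × (List (String × Int)) × List Int :=
  ([("c0", 5)], [("d0", 9)], [1, 2])

def Spec_gen_key_blocks (c : List (String × Int)) (d : List (String × Int)) (shifts : List Int) (out : (List (String × Int)) × (List (String × Int))) : Prop := out = gen_key_blocks_alt c d shifts
instance (c : List (String × Int)) (d : List (String × Int)) (shifts : List Int) (out : (List (String × Int)) × (List (String × Int))) : Decidable (Spec_gen_key_blocks c d shifts out) := by unfold Spec_gen_key_blocks; infer_instance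

-- ===== CLAIM (what is proved, stated in full; the proofs are below) =====
def Claim_equal_gen_key_blocks : Prop := ∀ (c : List (String × Int)) (d : List (String × Int)) (shifts : List Int), Dom_gen_key_blocks c d shifts → Pre_gen_key_blocks c d shifts → Spec_gen_key_blocks c d shifts (gen_key_blocks c d shifts)

-- ===== LEMMAS AND PROOFS =====

-- the value A's single step computes, as plain arithmetic (rotate left by one in 28 bits)
def rot1 (v : Int) : Int := if 2 ^ 27 ≤ v then 2 * v + 1 - 2 ^ 28 else 2 * v

-- the value B writes, as plain arithmetic (rotate left by r in 28 bits)
def rotN (r : Nat) (v : Int) : Int := (v * 2 ^ r) % 2 ^ 28 + v / 2 ^ (28 - r)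

-- A's inner loop on one half
def iterA : Nat → Int → Int
  | 0, v => v
  | n + 1, v => iterA n (aStep v)

lemma aInner_eq_iterA (n : Nat) : ∀ cf df, aInner n cf df = (iterA n cf, iterA n df) := by
  induction n with
  | zero => intro cf df; rfl
  | succ n ih => intro cf df; simp [aInner, iterA, ih]

lemma pyBinLen_lt (v : Int) (h0 : 0 ≤ v) (h1 : v < 2 ^ 28) : pyBinLen v ≤ 28 := by
  unfold pyBinLen
  rw [if_neg (by omega)]
  have hb := PySem.Int.lt_two_pow_bitLength v
  by_cases h : PySem.Int.bitLength v ≤ 28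
  · omega
  · exfalso
    have hne : v ≠ 0 := by
      rintro rfl
      simp [PySem.Int.bitLength_zero] at h
    have hlo := PySem.Int.two_pow_bitLength_le v hne
    have : (2 : Nat) ^ 28 ≤ 2 ^ (PySem.Int.bitLength v - 1) :=
      Nat.pow_le_pow_right (by norm_num) (by omega)
    omega

lemma pyBinLen_eq_29 (v : Int) (h0 : 2 ^ 28 ≤ v) (h1 : v < 2 ^ 29) : pyBinLen v = 29 := by
  unfold pyBinLen
  rw [if_neg (by omega)]
  have hne : v ≠ 0 := by omega
  have hlo := PySem.Int.two_pow_bitLength_le v hne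
  have hhi := PySem.Int.lt_two_pow_bitLength v
  have hva : (2 : Nat) ^ 28 ≤ v.natAbs ∧ v.natAbs < 2 ^ 29 := by
    constructor <;> [omega; omega]
  by_cases h : PySem.Int.bitLength v ≤ 29
  · by_cases h' : 29 ≤ PySem.Int.bitLength v
    · omega
    · exfalso
      have : (2 : Nat) ^ (PySem.Int.bitLength v) ≤ 2 ^ 28 :=
        Nat.pow_le_pow_right (by norm_num) (by omega)
      omega
  · exfalso
    have : (2 : Nat) ^ 29 ≤ 2 ^ (PySem.Int.bitLength v - 1) :=
      Nat.pow_le_pow_right (by norm_num) (by omega)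
    omega

lemma aStep_eq_rot1 (v : Int) (h0 : 0 ≤ v) (h1 : v < 2 ^ 28) : aStep v = rot1 v := by
  unfold aStep rot1
  rw [Int.shiftLeft_eq]
  by_cases h : 2 ^ 27 ≤ v
  · have h29 : pyBinLen (v * 2 ^ 1) = 29 := pyBinLen_eq_29 _ (by push_cast; omega) (by push_cast; omega)
    have h29' : pyBinLen (v * 2 ^ 1 + 1) = 29 := pyBinLen_eq_29 _ (by push_cast; omega) (by push_cast; omega)
    rw [if_pos (by omega), if_pos h]
    unfold remove_first_bit
    rw [h29']
    norm_num; omega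
  · have hle : pyBinLen (v * 2 ^ 1) ≤ 28 := pyBinLen_lt _ (by positivity) (by push_cast; omega)
    rw [if_neg (by omega), if_neg h]
    ring

lemma rot1_range (v : Int) (h0 : 0 ≤ v) (h1 : v < 2 ^ 28) : 0 ≤ rot1 v ∧ rot1 v < 2 ^ 28 := by
  unfold rot1; split_ifs <;> omega

lemma rotN_range (r : Nat) (hr : r < 28) (v : Int) (h0 : 0 ≤ v) (h1 : v < 2 ^ 28) :
    0 ≤ rotN r v ∧ rotN r v < 2 ^ 28 := by
  unfold rotN
  interval_cases r <;> (norm_num; omega)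

lemma rotN_rot1 (r : Nat) (hr : r < 28) (v : Int) (h0 : 0 ≤ v) (h1 : v < 2 ^ 28) :
    rotN r (rot1 v) = rotN (r + 1) v := by
  unfold rotN rot1
  interval_cases r <;> (norm_num; split_ifs <;> omega)

lemma rotN_28 (v : Int) : rotN 28 v = v := by
  unfold rotN; norm_num

lemma rotN_0 (v : Int) (h0 : 0 ≤ v) (h1 : v < 2 ^ 28) : rotN 0 v = v := by
  unfold rotN; norm_num; omega

lemma iterA_eq_rotN (n : Nat) : ∀ v : Int, 0 ≤ v → v < 2 ^ 28 →
    iterA n v = rotN (n % 28) v := by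
  induction n with
  | zero => intro v h0 h1; simpa [iterA] using (rotN_0 v h0 h1).symm
  | succ n ih =>
    intro v h0 h1
    have hs := rot1_range v h0 h1
    have : iterA (n + 1) v = iterA n (rot1 v) := by
      simp [iterA, aStep_eq_rot1 v h0 h1]
    rw [this, ih (rot1 v) hs.1 hs.2, rotN_rot1 (n % 28) (Nat.mod_lt _ (by norm_num)) v h0 h1]
    rcases Nat.lt_or_ge (n % 28) 27 with h | h
    · have : (n + 1) % 28 = n % 28 + 1 := by omega
      rw [this]
    · have h27 : n % 28 = 27 := by omega
      have : (n + 1) % 28 = 0 := by omega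
      rw [h27, this, rotN_28 v, rotN_0 v h0 h1]

-- B's written value equals rotN of the reduced shift, and the reduced shifts agree
lemma b_shift_eq (sh : Int) : (PySem.Int.mod (max sh 0) 28).toNat = sh.toNat % 28 := by
  rw [PySem.Int.mod_eq_emod_of_pos (by norm_num)]; omega

lemma b_val_eq (v : Int) (s : Nat) :
    PySem.Int.mod (v * 2 ^ s) ((1 : Int) <<< (28 : Nat)) + PySem.Int.floordiv v (2 ^ (28 - s)) =
      rotN s v := by
  have h28 : ((1 : Int) <<< (28 : Nat)) = 2 ^ 28 := by decide
  rw [h28, PySem.Int.mod_eq_emod_of_pos (by norm_num),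
      PySem.Int.floordiv_eq_ediv_of_pos (by positivity)]
  unfold rotN
  rfl

lemma inR28_some (o : Option Int) (h : inR28 o = true) :
    ∃ v, o = some v ∧ 0 ≤ v ∧ v < 2 ^ 28 := by
  cases o with
  | none => simp [inR28] at h
  | some v => exact ⟨v, rfl, by simpa [inR28] using h⟩

lemma outer_eq : ∀ (shifts : List Int) (x : Int) (c d : PySem.Dict String Int),
    inR28 (c.get? ("c" ++ PySem.Int.toStr x)) = true →
    inR28 (d.get? ("d" ++ PySem.Int.toStr x)) = true →
    aOuter x shifts c d = bOuter x shifts c d := by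
  intro shifts
  induction shifts with
  | nil => intro x c d _ _; rfl
  | cons sh rest ih =>
    intro x c d hc hd
    obtain ⟨cf, hcf, hcf0, hcf1⟩ := inR28_some _ hc
    obtain ⟨df, hdf, hdf0, hdf1⟩ := inR28_some _ hd
    have hmod : sh.toNat % 28 < 28 := Nat.mod_lt _ (by norm_num)
    have hcv := rotN_range _ hmod cf hcf0 hcf1
    have hdv := rotN_range _ hmod df hdf0 hdf1
    show aOuter x (sh :: rest) c d = bOuter x (sh :: rest) c d
    unfold aOuter bOuter
    simp only [PySem.Dict.getD_eq_get?_getD, hcf, hdf, Option.getD_some, aInner_eq_iterA, b_shift_eq]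
    rw [iterA_eq_rotN sh.toNat cf hcf0 hcf1, iterA_eq_rotN sh.toNat df hdf0 hdf1,
        b_val_eq cf _, b_val_eq df _]
    exact ih (x + 1) _ _
      (by rw [PySem.Dict.get?_insert_self]; simp [inR28]; exact ⟨hcv.1, hcv.2⟩)
      (by rw [PySem.Dict.get?_insert_self]; simp [inR28]; exact ⟨hdv.1, hdv.2⟩)

-- ===== VERDICT (by name: the statement is the Claim_ definition above) =====
theorem gen_key_blocks_spec : Claim_equal_gen_key_blocks := by
  intro c d shifts _ hpre
  unfold Spec_gen_key_blocks gen_key_blocks gen_key_blocks_alt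
  rcases hpre with h | ⟨hc, hd⟩
  · subst h; rfl
  · have h0c : ("c" ++ PySem.Int.toStr 0) = "c0" := by decide
    have h0d : ("d" ++ PySem.Int.toStr 0) = "d0" := by decide
    rw [outer_eq shifts 0 (PySem.Dict.mk c) (PySem.Dict.mk d)
      (by rw [h0c]; exact hc) (by rw [h0d]; exact hd)]
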